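-- pv_equiv track=rewrite | github.com/ionesu/sandbox | algorithms/sprint_4/search_system.py | search_system
-- ===== SOURCE A (Python) =====
-- from collections import Counter, defaultdict
-- from typing import List, Tuple, Set
--
-- def filenames_words_index(docs: List[List[str]]) -> defaultdict:
--     result = defaultdict(dict)
--
--     for doc_index, doc_words in enumerate(docs, start=1):
--         for word, count in Counter(doc_words).items():
--             result[word][doc_index] = count
--
--     return result
--
-- def search_system(docs: List[List[str]], number_of_queries: int, ques: List[Set[str]]):
--     filenames_words = filenames_words_index(docs)
--
--     result = [defaultdict(int) for _ in range(number_of_queries)]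
--
--     for index in range(number_of_queries):
--         for word in ques[index]:
--             for doc, count in filenames_words.get(word, {}).items():
--                 result[index][doc] += count
--
--     return [sorted(i.items()) for i in result]
-- ===== SOURCE B (Python) =====
-- from collections import Counter
--
-- def search_system(docs, number_of_queries, ques):
--     # Direct scan: one Counter per document, then per query walk the docs in
--     # order, keeping (doc_index, total) whenever the total matched count is positive.
--     counters = [Counter(doc_words) for doc_words in docs]
--     result = []
--     for index in range(number_of_queries):
--         query = ques[index]
--         row = []
--         for doc_index, cnt in enumerate(counters, start=1):
--             total = sum(cnt[w] for w in query)
--             if total > 0: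
--                 row.append((doc_index, total))
--         result.append(row)
--     return result
-- ===== Notes on version B (the rewrite author's own statement) =====
-- stated objective: alternative
-- what changed: B replaces A's prebuilt inverted index (word -> {doc: count} postings walked per query into a defaultdict that is then sorted) with a direct per-query scan over one Counter per document, emitting (doc_index, total) in doc order whenever the total matched count is positive, so no index, no defaultdict and no sort are needed.
import Mathlib
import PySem

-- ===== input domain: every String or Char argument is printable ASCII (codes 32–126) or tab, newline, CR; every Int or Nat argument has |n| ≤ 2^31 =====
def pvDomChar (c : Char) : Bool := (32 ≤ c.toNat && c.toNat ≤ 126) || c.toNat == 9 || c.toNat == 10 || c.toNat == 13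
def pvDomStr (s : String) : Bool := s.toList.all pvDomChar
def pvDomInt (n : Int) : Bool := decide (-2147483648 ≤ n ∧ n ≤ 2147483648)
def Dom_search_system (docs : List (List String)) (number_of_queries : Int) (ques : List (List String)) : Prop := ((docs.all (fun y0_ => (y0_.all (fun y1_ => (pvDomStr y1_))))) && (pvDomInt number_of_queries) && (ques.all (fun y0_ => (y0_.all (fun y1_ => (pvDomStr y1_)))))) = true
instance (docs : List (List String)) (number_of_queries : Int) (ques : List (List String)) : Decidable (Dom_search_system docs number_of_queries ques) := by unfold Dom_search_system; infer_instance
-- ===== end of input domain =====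

-- B drops A's prebuilt inverted index and instead scans the documents directly per query
-- (one Counter per document, kept rows already in doc order): a different decomposition, not faster.

-- ===== PORT A =====
def filenames_words_index (docs : List (List String)) : PySem.Dict String (PySem.Dict Int Int) :=
  (PySem.List.enumerate docs 1).foldl
    (fun result p =>
      ((PySem.Dict.counter p.2).items).foldl
        (fun result q => result.insert q.1 ((result.getD q.1 PySem.Dict.empty).insert p.1 q.2))
        result)
    PySem.Dict.empty

-- `ques[index]` is ported as pyGetD with default []: Pre_ excludes the out-of-range indices
-- on which Python raises IndexError.  `result[index]` is only ever updated at its own index,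
-- so the list of per-query defaultdicts is rendered as a map over the query indices.
def search_system (docs : List (List String)) (number_of_queries : Int) (ques : List (List String)) : List (List (Int × Int)) :=
  let filenames_words := filenames_words_index docs
  ((PySem.List.pyRange 0 number_of_queries 1).map (fun index =>
      (PySem.List.pyGetD ques index []).foldl
        (fun acc word =>
          ((filenames_words.getD word PySem.Dict.empty).items).foldl
            (fun acc p => acc.insert p.1 (acc.getD p.1 0 + p.2)) acc)
        PySem.Dict.empty)).map
    (fun i => PySem.List.sorted2 i.items Prod.fst Prod.snd)

-- ===== PORT B =====
def search_system_alt (docs : List (List String)) (number_of_queries : Int) (ques : List (List String)) : List (List (Int × Int)) :=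
  let counters := docs.map (fun doc_words => PySem.Dict.counter doc_words)
  (PySem.List.pyRange 0 number_of_queries 1).map (fun index =>
    let query := PySem.List.pyGetD ques index []
    (PySem.List.enumerate counters 1).foldl
      (fun row p =>
        let total : Int := (query.map (fun w => p.2.getD w 0)).sum
        if total > 0 then row ++ [(p.1, total)] else row)
      [])

-- ===== PRECONDITION & SPEC =====
-- Python A evaluates ques[index] for every index in range(number_of_queries) and raises
-- IndexError when number_of_queries > len(ques); exactly those inputs are excluded.
def Pre_search_system (docs : List (List String)) (number_of_queries : Int) (ques : List (List String)) : Prop :=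
  number_of_queries ≤ (ques.length : Int)
instance (docs : List (List String)) (number_of_queries : Int) (ques : List (List String)) : Decidable (Pre_search_system docs number_of_queries ques) := by unfold Pre_search_system; infer_instance

def pvWitness_search_system : List (List String) × Int × List (List String) :=
  ([["a", "b", "a"], ["b"]], 2, [["a"], ["b", "b"]])

def Spec_search_system (docs : List (List String)) (number_of_queries : Int) (ques : List (List String)) (out : List (List (Int × Int))) : Prop := out = search_system_alt docs number_of_queries ques
instance (docs : List (List String)) (number_of_queries : Int) (ques : List (List String)) (out : List (List (Int × Int))) : Decidable (Spec_search_system docs number_of_queries ques out) := by unfold Spec_search_system; infer_instance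

-- ===== CLAIM (what is proved, stated in full; the proofs are below) =====
def Claim_equal_search_system : Prop := ∀ (docs : List (List String)) (number_of_queries : Int) (ques : List (List String)), Dom_search_system docs number_of_queries ques → Pre_search_system docs number_of_queries ques → Spec_search_system docs number_of_queries ques (search_system docs number_of_queries ques)


-- ===== LEMMAS AND PROOFS =====

-- elements with the same first component in a fst-Nodup list are equal
theorem pv_fst_inj {α : Type} (l : List (Int × α)) (h : (l.map Prod.fst).Nodup)
    (a b : Int × α) (ha : a ∈ l) (hb : b ∈ l) (hab : a.1 = b.1) : a = b :=
  List.inj_on_of_nodup_map h ha hb hab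

-- filtering a fst-Nodup list down to one key
theorem pv_filter_unique {α : Type} (l : List (Int × α)) (Q : Int × α → Bool) (p : Int × α)
    (h : (l.map Prod.fst).Nodup) (hp : p ∈ l) :
    l.filter (fun r => (r.1 == p.1) && Q r) = if Q p then [p] else [] := by
  induction l with
  | nil => cases hp
  | cons a t ih =>
    simp only [List.map_cons, List.nodup_cons] at h
    rcases List.mem_cons.1 hp with rfl | hp'
    · have ht : t.filter (fun r => (r.1 == p.1) && Q r) = [] := by
        rw [List.filter_eq_nil_iff]
        intro r hr
        have hne : r.1 ≠ p.1 := fun e => h.1 (e ▸ List.mem_map_of_mem hr)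
        simp [hne]
      rw [List.filter_cons, ht]
      by_cases hQ : Q p = true <;> simp [hQ]
    · have hne : a.1 ≠ p.1 := fun e => h.1 (e ▸ List.mem_map_of_mem hp')
      rw [List.filter_cons, if_neg (by simp [hne])]
      exact ih h.2 hp'

theorem pv_any_unique {α : Type} (l : List (Int × α)) (Q : Int × α → Bool) (p : Int × α)
    (h : (l.map Prod.fst).Nodup) (hp : p ∈ l) :
    (l.any (fun r => Q r && (r.1 == p.1))) = Q p := by
  by_cases hQ : Q p = true
  · rw [hQ]
    exact List.any_eq_true.2 ⟨p, hp, by simp [hQ]⟩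
  · rw [Bool.eq_false_iff.2 hQ]
    rw [List.any_eq_false]
    intro x hx hcon
    rw [Bool.and_eq_true, beq_iff_eq] at hcon
    exact hQ (pv_fst_inj l h x p hx hp hcon.2 ▸ hcon.1)

-- the slot of word w after the inner Counter-items loop of filenames_words_index
theorem pv_inner_none (ps : List (String × Int)) (r : PySem.Dict String (PySem.Dict Int Int))
    (d : Int) (w : String) (hw : w ∉ ps.map Prod.fst) :
    (ps.foldl (fun r q => r.insert q.1 ((r.getD q.1 PySem.Dict.empty).insert d q.2)) r).getD w PySem.Dict.empty
      = r.getD w PySem.Dict.empty := by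
  induction ps generalizing r with
  | nil => rfl
  | cons a t ih =>
    simp only [List.map_cons, List.mem_cons, not_or] at hw
    rw [List.foldl_cons, ih _ hw.2, PySem.Dict.getD_insert_of_ne _ _ _ hw.1]

theorem pv_inner_some (ps : List (String × Int)) (r : PySem.Dict String (PySem.Dict Int Int))
    (d : Int) (w : String) (c : Int) (hnd : (ps.map Prod.fst).Nodup) (hw : (w, c) ∈ ps) :
    (ps.foldl (fun r q => r.insert q.1 ((r.getD q.1 PySem.Dict.empty).insert d q.2)) r).getD w PySem.Dict.empty
      = (r.getD w PySem.Dict.empty).insert d c := by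
  induction ps generalizing r with
  | nil => cases hw
  | cons a t ih =>
    simp only [List.map_cons, List.nodup_cons] at hnd
    rcases List.mem_cons.1 hw with rfl | hw'
    · rw [List.foldl_cons]
      have ht : w ∉ t.map Prod.fst := hnd.1
      rw [pv_inner_none t _ d w ht, PySem.Dict.getD_insert_self]
    · have hne : w ≠ a.1 := by
        intro e
        exact hnd.1 (e ▸ List.mem_map_of_mem hw')
      rw [List.foldl_cons, ih _ hnd.2 hw', PySem.Dict.getD_insert_of_ne _ _ _ hne]

-- the slot of word w through the outer loop of filenames_words_index
theorem pv_outer (l : List (Int × List String)) (r : PySem.Dict String (PySem.Dict Int Int)) (w : String)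
    (hnd : (l.map Prod.fst).Nodup)
    (hfresh : ∀ p ∈ l, (r.getD w PySem.Dict.empty).contains p.1 = false) :
    ((l.foldl (fun result p => ((PySem.Dict.counter p.2).items).foldl
        (fun result q => result.insert q.1 ((result.getD q.1 PySem.Dict.empty).insert p.1 q.2)) result) r).getD w PySem.Dict.empty).items
      = (r.getD w PySem.Dict.empty).items
        ++ (l.filter (fun p => decide (0 < p.2.count w))).map (fun p => (p.1, (p.2.count w : Int))) := by
  induction l generalizing r with
  | nil => simp
  | cons a t ih =>
    simp only [List.map_cons, List.nodup_cons] at hnd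
    rw [List.foldl_cons, List.filter_cons]
    have hpsfst : ((PySem.Dict.counter a.2).items).map Prod.fst = PySem.Set.ofList a.2 := by
      rw [PySem.Dict.items_counter, List.map_map]
      simp [Function.comp_def]
    by_cases hw : w ∈ a.2
    · have hmem : (w, ((a.2.count w : Int))) ∈ (PySem.Dict.counter a.2).items := by
        rw [PySem.Dict.items_counter]
        exact List.mem_map_of_mem ((PySem.Set.mem_ofList _ _).2 hw)
      have hslot :
          (((PySem.Dict.counter a.2).items).foldl
              (fun result q => result.insert q.1 ((result.getD q.1 PySem.Dict.empty).insert a.1 q.2)) r).getD w PySem.Dict.empty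
            = (r.getD w PySem.Dict.empty).insert a.1 (a.2.count w : Int) := by
        apply pv_inner_some
        · rw [hpsfst]; exact PySem.Set.nodup_ofList _
        · exact hmem
      have hcnt : decide (0 < a.2.count w) = true := by
        simp [List.count_pos_iff, hw]
      rw [ih _ hnd.2 ?fresh]
      · rw [hslot, PySem.Dict.items_insert_of_not_contains _ _ (hfresh a (List.mem_cons_self))]
        simp [hw, List.count_pos_iff, List.append_assoc]
      case fresh =>
        intro p hp
        rw [hslot, PySem.Dict.contains_insert]
        have hne : p.1 ≠ a.1 := by
          intro e
          exact hnd.1 (e ▸ List.mem_map_of_mem hp)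
        simp [hne, hfresh p (List.mem_cons_of_mem _ hp)]
    · have hslot :
          (((PySem.Dict.counter a.2).items).foldl
              (fun result q => result.insert q.1 ((result.getD q.1 PySem.Dict.empty).insert a.1 q.2)) r).getD w PySem.Dict.empty
            = r.getD w PySem.Dict.empty := by
        apply pv_inner_none
        rw [hpsfst]
        simp [PySem.Set.mem_ofList, hw]
      have hcnt : decide (0 < a.2.count w) = false := by
        simp [List.count_pos_iff, hw]
      rw [ih _ hnd.2 ?fresh2]
      · rw [hslot, hcnt]
        simp
      case fresh2 =>
        intro p hp
        rw [hslot]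
        exact hfresh p (List.mem_cons_of_mem _ hp)

theorem pv_enum_fst_nodup {α : Type} (l : List α) (s : Int) :
    ((PySem.List.enumerate l s).map Prod.fst).Nodup := by
  have h := PySem.List.pairwise_lt_enumerate l s
  have h2 : ((PySem.List.enumerate l s).map Prod.fst).Pairwise (· < ·) := by
    rw [List.pairwise_map]; exact h
  exact h2.imp ne_of_lt

-- the postings list stored for word w in A's inverted index
theorem pv_fwslot (docs : List (List String)) (w : String) :
    ((filenames_words_index docs).getD w PySem.Dict.empty).items
      = ((PySem.List.enumerate docs 1).filter (fun p => decide (0 < p.2.count w))).map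
          (fun p => (p.1, (p.2.count w : Int))) := by
  unfold filenames_words_index
  rw [pv_outer _ _ _ (pv_enum_fst_nodup docs 1) (fun p _ => by rw [PySem.Dict.getD_empty]; exact PySem.Dict.contains_empty _)]
  rw [PySem.Dict.getD_empty]
  rfl

-- A's accumulation loop over one postings list, observed at one doc key
theorem pv_post_getD (ps : List (Int × Int)) (acc : PySem.Dict Int Int) (d : Int) :
    (ps.foldl (fun acc p => acc.insert p.1 (acc.getD p.1 0 + p.2)) acc).getD d 0
      = acc.getD d 0 + ((ps.filter (fun p => p.1 == d)).map Prod.snd).sum := by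
  induction ps generalizing acc with
  | nil => simp
  | cons p t ih =>
    rw [List.foldl_cons, ih, List.filter_cons]
    by_cases hd : p.1 = d
    · subst hd
      simp [PySem.Dict.getD_insert_self]
      ring
    · rw [PySem.Dict.getD_insert_of_ne _ _ _ (Ne.symm hd)]
      simp [hd]

theorem pv_post_contains (ps : List (Int × Int)) (acc : PySem.Dict Int Int) (d : Int) :
    (ps.foldl (fun acc p => acc.insert p.1 (acc.getD p.1 0 + p.2)) acc).contains d
      = (acc.contains d || ps.any (fun p => p.1 == d)) := by
  induction ps generalizing acc with
  | nil => simp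
  | cons p t ih =>
    rw [List.foldl_cons, ih, PySem.Dict.contains_insert, List.any_cons]
    by_cases hd : p.1 = d
    · subst hd; simp
    · have h1 : (d == p.1) = false := beq_eq_false_iff_ne.2 (Ne.symm hd)
      have h2 : (p.1 == d) = false := beq_eq_false_iff_ne.2 hd
      rw [h1, h2]
      simp

-- A's per-query loop over the words, generic in the postings map I
theorem pv_q_getD (q : List String) (I : String → List (Int × Int)) (acc : PySem.Dict Int Int) (d : Int) :
    (q.foldl (fun acc word => (I word).foldl (fun acc p => acc.insert p.1 (acc.getD p.1 0 + p.2)) acc) acc).getD d 0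
      = acc.getD d 0 + (q.map (fun w => (((I w).filter (fun p => p.1 == d)).map Prod.snd).sum)).sum := by
  induction q generalizing acc with
  | nil => simp
  | cons w t ih =>
    rw [List.foldl_cons, ih, pv_post_getD, List.map_cons, List.sum_cons]
    ring

theorem pv_q_contains (q : List String) (I : String → List (Int × Int)) (acc : PySem.Dict Int Int) (d : Int) :
    (q.foldl (fun acc word => (I word).foldl (fun acc p => acc.insert p.1 (acc.getD p.1 0 + p.2)) acc) acc).contains d
      = (acc.contains d || q.any (fun w => (I w).any (fun p => p.1 == d))) := by
  induction q generalizing acc with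
  | nil => simp
  | cons w t ih =>
    rw [List.foldl_cons, ih, pv_post_contains, List.any_cons, Bool.or_assoc]

theorem pv_q_nodup_keys (q : List String) (I : String → List (Int × Int)) (acc : PySem.Dict Int Int)
    (h : acc.keys.Nodup) :
    (q.foldl (fun acc word => (I word).foldl (fun acc p => acc.insert p.1 (acc.getD p.1 0 + p.2)) acc) acc).keys.Nodup := by
  induction q generalizing acc with
  | nil => exact h
  | cons w t ih =>
    rw [List.foldl_cons]
    exact ih _ (PySem.Dict.nodup_keys_foldl_insert_key (I w) (fun p : Int × Int => p.1) (fun (acc : PySem.Dict Int Int) (p : Int × Int) => acc.getD p.1 0 + p.2) acc h)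

-- a sum of per-word counts is positive iff some word occurs
theorem pv_tot_pos (q : List String) (dw : List String) :
    (0 < (q.map (fun w => (dw.count w : Int))).sum) ↔ (q.any (fun w => decide (0 < dw.count w)) = true) := by
  induction q with
  | nil => simp
  | cons w t ih =>
    have h0 : (0:Int) ≤ (t.map (fun w => (dw.count w : Int))).sum := by
      apply List.sum_nonneg
      intro x hx
      obtain ⟨y, _, rfl⟩ := List.mem_map.1 hx
      exact Int.natCast_nonneg _
    have hc : (0:Int) ≤ (dw.count w : Int) := Int.natCast_nonneg _
    simp only [List.map_cons, List.sum_cons, List.any_cons, Bool.or_eq_true, ← ih,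
      decide_eq_true_eq]
    omega

theorem pv_insertBy_congr {α : Type} (b b' : α → α → Bool) (x : α) (ys : List α)
    (h : ∀ y ∈ ys, b x y = b' x y) :
    PySem.List.insertBy b x ys = PySem.List.insertBy b' x ys := by
  induction ys with
  | nil => rfl
  | cons y t ih =>
    show (if b x y then x :: y :: t else y :: PySem.List.insertBy b x t)
        = (if b' x y then x :: y :: t else y :: PySem.List.insertBy b' x t)
    rw [h y (List.mem_cons_self), ih (fun z hz => h z (List.mem_cons_of_mem _ hz))]

theorem pv_foldl_insertBy_congr {α : Type} (S : List α) (b b' : α → α → Bool)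
    (h : ∀ a ∈ S, ∀ y ∈ S, b a y = b' a y) :
    ∀ (xs acc : List α), (∀ a ∈ xs, a ∈ S) → (∀ a ∈ acc, a ∈ S) →
      xs.foldl (fun acc x => PySem.List.insertBy b x acc) acc
        = xs.foldl (fun acc x => PySem.List.insertBy b' x acc) acc := by
  intro xs
  induction xs with
  | nil => intro acc _ _; rfl
  | cons x t ih =>
    intro acc hxs hacc
    rw [List.foldl_cons, List.foldl_cons]
    have hx : x ∈ S := hxs x (List.mem_cons_self)
    rw [pv_insertBy_congr b b' x acc (fun y hy => h x hx y (hacc y hy))]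
    apply ih _ (fun a ha => hxs a (List.mem_cons_of_mem _ ha))
    intro a ha
    rcases (PySem.List.mem_insertBy _ _ _ _).1 ha with rfl | ha'
    · exact hx
    · exact hacc a ha' 

-- Python's tuple sort of an assoc list with distinct keys is the sort by key
theorem pv_sorted2_eq_sorted (xs : List (Int × Int)) (h : (xs.map Prod.fst).Nodup) :
    PySem.List.sorted2 xs Prod.fst Prod.snd = PySem.List.sorted xs Prod.fst := by
  simp only [PySem.List.sorted2, PySem.List.sorted, if_neg (by decide : ¬ (false = true))]
  apply pv_foldl_insertBy_congr xs _ _ _ xs [] (fun a ha => ha) (fun a ha => absurd ha (List.not_mem_nil))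
  intro a ha y hy
  rcases lt_trichotomy a.1 y.1 with hlt | heq | hgt
  · simp [hlt]
  · have : a = y := pv_fst_inj xs h a y ha hy heq
    subst this
    simp
  · simp [hgt, not_lt_of_gt hgt]

theorem pv_enum_map {α β : Type} (l : List α) (f : α → β) (s : Int) :
    PySem.List.enumerate (l.map f) s = (PySem.List.enumerate l s).map (fun p => (p.1, f p.2)) := by
  induction l generalizing s with
  | nil => rfl
  | cons x t ih =>
    rw [List.map_cons, PySem.List.enumerate_cons, PySem.List.enumerate_cons, ih, List.map_cons]

-- B's row loop is append-filter over the enumerated counters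
theorem pv_brow (q : List String) (l : List (Int × PySem.Dict String Int)) (row : List (Int × Int)) :
    l.foldl (fun row p =>
        let total : Int := (q.map (fun w => p.2.getD w 0)).sum
        if total > 0 then row ++ [(p.1, total)] else row) row
      = row ++ (l.filter (fun p => decide (0 < (q.map (fun w => p.2.getD w 0)).sum))).map
          (fun p => (p.1, (q.map (fun w => p.2.getD w 0)).sum)) := by
  induction l generalizing row with
  | nil => simp
  | cons a t ih =>
    rw [List.foldl_cons, List.filter_cons]
    show t.foldl _ (if (0:Int) < (q.map (fun w => a.2.getD w 0)).sum then row ++ [(a.1, (q.map (fun w => a.2.getD w 0)).sum)] else row) = _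
    by_cases hc : (0:Int) < (q.map (fun w => a.2.getD w 0)).sum
    · rw [if_pos hc, ih]
      simp [hc, List.append_assoc]
    · rw [if_neg hc, ih]
      simp [hc]

-- the main per-query row equality
theorem pv_row (docs : List (List String)) (q : List String) :
    PySem.List.sorted2
        ((q.foldl (fun acc word =>
            (((filenames_words_index docs).getD word PySem.Dict.empty).items).foldl
              (fun acc p => acc.insert p.1 (acc.getD p.1 0 + p.2)) acc) PySem.Dict.empty).items)
        Prod.fst Prod.snd
      = (PySem.List.enumerate (docs.map (fun doc_words => PySem.Dict.counter doc_words)) 1).foldl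
          (fun row p =>
            let total : Int := (q.map (fun w => p.2.getD w 0)).sum
            if total > 0 then row ++ [(p.1, total)] else row) [] := by
  classical
  have hIw := pv_fwslot docs
  have henodup : ((PySem.List.enumerate docs 1).map Prod.fst).Nodup := pv_enum_fst_nodup docs 1
  set enum := PySem.List.enumerate docs 1 with henum
  set D := q.foldl (fun acc word =>
      (((filenames_words_index docs).getD word PySem.Dict.empty).items).foldl
        (fun acc p => acc.insert p.1 (acc.getD p.1 0 + p.2)) acc) PySem.Dict.empty with hD
  -- (a) the value A stores for an enumerated document
  have hgetD : ∀ p ∈ enum, D.getD p.1 0 = (q.map (fun w => (p.2.count w : Int))).sum := by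
    intro p hp
    rw [hD, pv_q_getD, PySem.Dict.getD_empty, zero_add]
    congr 1
    apply List.map_congr_left
    intro w _
    rw [hIw w, List.filter_map, List.filter_filter]
    simp only [Function.comp_def]
    rw [pv_filter_unique enum _ p henodup hp]
    by_cases hc : 0 < p.2.count w
    · simp [hc]
    · simp [Nat.le_zero.1 (Nat.not_lt.1 hc)]
  -- (b) the docs A's per-query dict contains
  have hcontmem : ∀ p ∈ enum, D.contains p.1 = decide (0 < (q.map (fun w => (p.2.count w : Int))).sum) := by
    intro p hp
    rw [hD, pv_q_contains, PySem.Dict.contains_empty, Bool.false_or]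
    have hone : ∀ w, ((((filenames_words_index docs).getD w PySem.Dict.empty).items).any (fun r => r.1 == p.1))
        = decide (0 < p.2.count w) := by
      intro w
      rw [hIw w, List.any_map, List.any_filter]
      simp only [Function.comp_def]
      exact pv_any_unique enum _ p henodup hp
    simp only [hone]
    by_cases hs : 0 < (q.map (fun w => (p.2.count w : Int))).sum
    · rw [(pv_tot_pos q p.2).1 hs, decide_eq_true hs]
    · have h1 : (q.any fun w => decide (0 < p.2.count w)) = false := by
        rw [← Bool.not_eq_true]
        intro hcon
        exact hs ((pv_tot_pos q p.2).2 hcon)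
      rw [h1, decide_eq_false hs]
  -- (c) every key of A's per-query dict is an enumerated doc index
  have hcontall : ∀ d, D.contains d = true → d ∈ enum.map Prod.fst := by
    intro d hd
    rw [hD, pv_q_contains, PySem.Dict.contains_empty, Bool.false_or] at hd
    obtain ⟨w, _, hany⟩ := List.any_eq_true.1 hd
    rw [hIw w] at hany
    obtain ⟨r, hr, hr2⟩ := List.any_eq_true.1 hany
    obtain ⟨a, ha, rfl⟩ := List.mem_map.1 hr
    have ha' := (List.mem_filter.1 ha).1
    exact (beq_iff_eq.1 hr2) ▸ List.mem_map_of_mem ha'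
  have hDnodup : D.keys.Nodup := by
    rw [hD]; exact pv_q_nodup_keys q _ _ PySem.Dict.nodup_keys_empty
  -- B side: append-if loop over the enumerated counters
  rw [pv_enum_map, pv_brow, List.nil_append, List.filter_map, List.map_map]
  simp only [Function.comp_def, PySem.Dict.getD_counter]
  -- A side: the tuple sort of a Nodup-key items list is the sort by key
  rw [pv_sorted2_eq_sorted _ (by simpa only [PySem.Dict.keys] using hDnodup)]
  have hkBnodup : ((enum.filter (fun a => decide (0 < (q.map (fun w => (a.2.count w : Int))).sum))).map Prod.fst).Nodup := by
    have h2 : ((enum.filter (fun a => decide (0 < (q.map (fun w => (a.2.count w : Int))).sum))).map Prod.fst).Pairwise (· < ·) := by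
      rw [List.pairwise_map]
      exact List.Pairwise.sublist List.filter_sublist (PySem.List.pairwise_lt_enumerate docs 1)
    exact h2.imp ne_of_lt
  apply PySem.List.sorted_eq_of_perm_of_pairwise_lt
  · -- the row is a permutation of the items list
    rw [PySem.Dict.items_eq_map_keys D hDnodup 0]
    have hBrew : (enum.filter (fun a => decide (0 < (q.map (fun w => (a.2.count w : Int))).sum))).map
          (fun a => (a.1, (q.map (fun w => (a.2.count w : Int))).sum))
        = ((enum.filter (fun a => decide (0 < (q.map (fun w => (a.2.count w : Int))).sum))).map Prod.fst).map
            (fun k => (k, D.getD k 0)) := by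
      rw [List.map_map]
      apply List.map_congr_left
      intro a ha
      simp only [Function.comp_def]
      rw [hgetD a (List.mem_filter.1 ha).1]
    rw [hBrew]
    apply List.Perm.map
    rw [List.perm_ext_iff_of_nodup hkBnodup hDnodup]
    intro k
    constructor
    · intro hk
      obtain ⟨a, ha, rfl⟩ := List.mem_map.1 hk
      obtain ⟨hae, haQ⟩ := List.mem_filter.1 ha
      rw [← PySem.Dict.contains_iff_mem_keys, hcontmem a hae]
      exact haQ
    · intro hk
      have hc : D.contains k = true := (PySem.Dict.contains_iff_mem_keys D k).2 hk
      obtain ⟨a, ha, rfl⟩ := List.mem_map.1 (hcontall k hc)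
      apply List.mem_map_of_mem
      rw [List.mem_filter]
      refine ⟨ha, ?_⟩
      rw [← hcontmem a ha]
      exact hc
  · -- and it is strictly increasing in the doc index
    rw [List.pairwise_map]
    exact List.Pairwise.sublist List.filter_sublist (PySem.List.pairwise_lt_enumerate docs 1)


-- ===== VERDICT (by name: the statement is the Claim_ definition above) =====
theorem search_system_spec : Claim_equal_search_system := by
  intro docs nq ques _ _
  unfold Spec_search_system search_system search_system_alt
  rw [List.map_map]
  exact List.map_congr_left (fun index _ => pv_row docs (PySem.List.pyGetD ques index []))
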